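-- pv_equiv track=rewrite | github.com/pgmabv99/pyproblems | codil1.py | Solution
-- ===== SOURCE A (Python) =====
-- def Solution(a):
--     x=sorted(a)
--     i=0
--     lx=len(x)
--     v=None
--     for i in   range(lx):
--       if i>0:
--           if(x[i]-x[i-1]>1):
--               v=x[i-1]+1
--
--     if v==None :
--         v=x[lx-1]+1
--     if v<0 :
--         v=1
--     return v
-- ===== SOURCE B (Python) =====
-- def Solution(a):
--     s = set(a)
--     m = max(s)
--     best = None
--     for e in s:
--         if e != m and e + 1 not in s and (best is None or e + 1 > best):
--             best = e + 1
--     v = m + 1 if best is None else best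
--     return 1 if v < 0 else v
-- ===== Notes on version B (the rewrite author's own statement) =====
-- stated objective: alternative
-- what changed: Replaces sort-then-scan-for-the-last-gap with a sort-free hash-set formulation: build set(a), take m=max, and the answer before clamping is the largest e+1 with e in the set, e!=m and e+1 not in the set (else m+1); no sorted order is ever materialised.
import Mathlib
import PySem

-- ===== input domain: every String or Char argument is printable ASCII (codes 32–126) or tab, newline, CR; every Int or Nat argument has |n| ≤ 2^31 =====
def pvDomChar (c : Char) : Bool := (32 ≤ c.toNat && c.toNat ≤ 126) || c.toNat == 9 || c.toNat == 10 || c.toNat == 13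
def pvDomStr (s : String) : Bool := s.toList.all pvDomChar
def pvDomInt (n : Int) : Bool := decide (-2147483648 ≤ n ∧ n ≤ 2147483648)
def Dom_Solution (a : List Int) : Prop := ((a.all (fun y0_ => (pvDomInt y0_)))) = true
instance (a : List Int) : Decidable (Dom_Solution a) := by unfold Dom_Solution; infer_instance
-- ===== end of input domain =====

-- B replaces A's sort-then-scan with a sort-free set formulation (max element plus the largest
-- e+1 with e in the set, e ≠ max, e+1 not in the set); objective: alternative.

-- ===== PORT A =====
def pvAfold (x : List Int) : Option Int :=
  (PySem.List.pyRange 0 (PySem.List.len x) 1).foldl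
    (fun v i =>
      if 0 < i then
        if PySem.List.pyGetD x i 0 - PySem.List.pyGetD x (i - 1) 0 > 1 then
          some (PySem.List.pyGetD x (i - 1) 0 + 1)
        else v
      else v)
    none

def Solution (a : List Int) : Int :=
  let x := PySem.List.sorted a (fun y => y) false
  let lx : Int := PySem.List.len x
  let v : Option Int := pvAfold x
  let v : Int :=
    match v with
    | none => PySem.List.pyGetD x (lx - 1) 0 + 1
    | some w => w
  if v < 0 then 1 else v

-- ===== PORT B =====
-- one step of B's loop body: 'if e != m and e+1 not in s and (best is None or e+1 > best): best = e+1'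
def pvStep (s : List Int) (m : Int) (b : Option Int) (e : Int) : Option Int :=
  if e = m ∨ e + 1 ∈ s then b
  else
    match b with
    | none => some (e + 1)
    | some w => if w < e + 1 then some (e + 1) else b

def pvBfold (s : List Int) (m : Int) : Option Int := s.foldl (pvStep s m) none

def Solution_alt (a : List Int) : Int :=
  let s : PySem.Set Int := PySem.Set.ofList a
  -- max(s): Python raises ValueError on an empty set — Pre_ excludes []; the 0 is dead code
  let m : Int :=
    match PySem.List.max? s (fun y => y) with
    | some w => w
    | none => 0
  let best : Option Int := pvBfold s m
  let v : Int :=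
    match best with
    | none => m + 1
    | some b => b
  if v < 0 then 1 else v

-- ===== PRECONDITION & SPEC =====
-- Pre_ excludes only the empty list, on which A raises IndexError (x[lx-1]).
def Pre_Solution (a : List Int) : Prop := a ≠ []
instance (a : List Int) : Decidable (Pre_Solution a) := by unfold Pre_Solution; infer_instance
def pvWitness_Solution : List Int := [3, 1, 7]

def Spec_Solution (a : List Int) (out : Int) : Prop := out = Solution_alt a
instance (a : List Int) (out : Int) : Decidable (Spec_Solution a out) := by unfold Spec_Solution; infer_instance

-- ===== CLAIM (what is proved, stated in full; the proofs are below) =====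
def Claim_equal_Solution : Prop := ∀ (a : List Int), Dom_Solution a → Pre_Solution a → Spec_Solution a (Solution a)

-- ===== LEMMAS AND PROOFS =====

-- the common characterisation: Q l m e = "e is in l, e+1 is not, and e is below the maximum m"
def pvQ (l : List Int) (m e : Int) : Prop := e ∈ l ∧ e + 1 ∉ l ∧ e < m

def pvGood (l : List Int) (m : Int) : Option Int → Prop
  | none => ∀ e, ¬ pvQ l m e
  | some w => ∃ e, w = e + 1 ∧ pvQ l m e ∧ ∀ e', pvQ l m e' → e' ≤ e

theorem pvQ_congr {l l' : List Int} {m m' e : Int} (hmem : ∀ y, y ∈ l ↔ y ∈ l')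
    (hm : m = m') : pvQ l m e ↔ pvQ l' m' e := by
  unfold pvQ; rw [hmem, hmem, hm]

theorem pvGood_unique {l l' : List Int} {m m' : Int} {o o' : Option Int}
    (hmem : ∀ y, y ∈ l ↔ y ∈ l') (hm : m = m')
    (h : pvGood l m o) (h' : pvGood l' m' o') : o = o' := by
  cases o with
  | none =>
    cases o' with
    | none => rfl
    | some w =>
      obtain ⟨e, _, hq, _⟩ := h'
      exact absurd ((pvQ_congr hmem hm).mpr hq) (h e)
  | some w =>
    cases o' with
    | none =>
      obtain ⟨e, _, hq, _⟩ := h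
      exact absurd ((pvQ_congr hmem hm).mp hq) (h' e)
    | some w' =>
      obtain ⟨e, hw, hq, hmax⟩ := h
      obtain ⟨e', hw', hq', hmax'⟩ := h'
      have h1 : e' ≤ e := hmax e' ((pvQ_congr hmem hm).mpr hq')
      have h2 : e ≤ e' := hmax' e ((pvQ_congr hmem hm).mp hq)
      have : e = e' := le_antisymm h2 h1
      simp [hw, hw', this]

-- ===== B side =====

theorem pvBfold_mono (s : List Int) (m : Int) :
    ∀ (l : List Int) (w0 : Int), ∃ w, l.foldl (pvStep s m) (some w0) = some w ∧ w0 ≤ w := by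
  intro l
  induction l with
  | nil => intro w0; exact ⟨w0, rfl, le_refl _⟩
  | cons h t ih =>
    intro w0
    simp only [List.foldl_cons]
    unfold pvStep
    by_cases hc : h = m ∨ h + 1 ∈ s
    · rw [if_pos hc]; exact ih w0
    · rw [if_neg hc]
      by_cases hlt : w0 < h + 1
      · simp only [if_pos hlt]
        obtain ⟨w, hw, hle⟩ := ih (h + 1)
        exact ⟨w, hw, by omega⟩
      · simp only [if_neg hlt]
        exact ih w0

theorem pvBfold_dom (s : List Int) (m : Int) :
    ∀ (l : List Int) (b : Option Int) (e : Int), e ∈ l → e ≠ m → e + 1 ∉ s →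
      ∃ w, l.foldl (pvStep s m) b = some w ∧ e + 1 ≤ w := by
  intro l
  induction l with
  | nil => intro b e he; exact absurd he (List.not_mem_nil)
  | cons h t ih =>
    intro b e he hem hen
    simp only [List.foldl_cons]
    rcases List.mem_cons.mp he with rfl | hmem
    · -- e = h: the step either installs e+1 or the accumulator already dominates it
      unfold pvStep
      rw [if_neg (by push Not; exact ⟨hem, hen⟩)]
      cases b with
      | none =>
        obtain ⟨w, hw, hle⟩ := pvBfold_mono s m t (e + 1)
        exact ⟨w, hw, hle⟩
      | some w0 =>
        by_cases hlt : w0 < e + 1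
        · simp only [if_pos hlt]
          obtain ⟨w, hw, hle⟩ := pvBfold_mono s m t (e + 1)
          exact ⟨w, hw, hle⟩
        · simp only [if_neg hlt]
          obtain ⟨w, hw, hle⟩ := pvBfold_mono s m t w0
          exact ⟨w, hw, by omega⟩
    · exact ih _ e hmem hem hen

theorem pvBfold_prov (s : List Int) (m : Int) :
    ∀ (l : List Int) (b : Option Int),
      l.foldl (pvStep s m) b = b ∨
        ∃ e ∈ l, e ≠ m ∧ e + 1 ∉ s ∧ l.foldl (pvStep s m) b = some (e + 1) := by
  intro l
  induction l with
  | nil => intro b; exact Or.inl rfl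
  | cons h t ih =>
    intro b
    simp only [List.foldl_cons]
    rcases ih (pvStep s m b h) with heq | ⟨e, he, h1, h2, h3⟩
    · rw [heq]
      unfold pvStep
      by_cases hcond : h = m ∨ h + 1 ∈ s
      · rw [if_pos hcond]; exact Or.inl rfl
      · rw [if_neg hcond]
        push Not at hcond
        cases b with
        | none => exact Or.inr ⟨h, List.mem_cons_self .., hcond.1, hcond.2, rfl⟩
        | some w0 =>
          by_cases hlt : w0 < h + 1
          · simp only [if_pos hlt]
            exact Or.inr ⟨h, List.mem_cons_self .., hcond.1, hcond.2, rfl⟩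
          · simp only [if_neg hlt]
            exact Or.inl trivial
    · exact Or.inr ⟨e, List.mem_cons_of_mem _ he, h1, h2, h3⟩

theorem pvB_good (s : List Int) (m : Int) (hmmax : ∀ y ∈ s, y ≤ m) :
    pvGood s m (pvBfold s m) := by
  unfold pvBfold
  rcases pvBfold_prov s m s none with heq | ⟨e, he, h1, h2, h3⟩
  · rw [heq]
    intro e ⟨hes, hen, helt⟩
    obtain ⟨w, hw, _⟩ := pvBfold_dom s m s none e hes (by omega) hen
    rw [heq] at hw; cases hw
  · rw [h3]
    refine ⟨e, rfl, ⟨he, h2, lt_of_le_of_ne (hmmax e he) h1⟩, ?_⟩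
    intro e' ⟨hes, hen, helt⟩
    obtain ⟨w, hw, hle⟩ := pvBfold_dom s m s none e' hes (by omega) hen
    rw [h3] at hw
    injection hw with hw
    omega

-- ===== A side =====

-- A's overwrite-fold returns the value for the LAST index satisfying q, i.e. find? over the reversed list.
theorem pv_foldl_overwrite (f : Int → Int) (q : Int → Bool) :
    ∀ (l : List Int) (v0 : Option Int),
      l.foldl (fun v i => if q i then some (f i) else v) v0 =
        match l.reverse.find? q with
        | some i => some (f i)
        | none => v0 := by
  intro l
  induction l with
  | nil => intro v0; simp
  | cons i rest ih =>
    intro v0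
    simp only [List.foldl_cons, ih, List.reverse_cons, List.find?_append]
    cases h : rest.reverse.find? q with
    | some j => simp
    | none => by_cases hq : q i <;> simp [hq]

-- find? over a strictly descending list returns the LARGEST element satisfying p
theorem pv_find_desc (p : Int → Bool) :
    ∀ (r : List Int), r.Pairwise (· > ·) → ∀ i, r.find? p = some i →
      p i = true ∧ i ∈ r ∧ ∀ j ∈ r, i < j → p j = false := by
  intro r
  induction r with
  | nil => intro _ i h; exact absurd h (by simp)
  | cons h t ih =>
    intro hpw i hf
    have hpw' := (List.pairwise_cons.mp hpw)
    by_cases hp : p h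
    · rw [List.find?_cons_of_pos hp] at hf
      injection hf with hf; subst hf
      refine ⟨hp, List.mem_cons_self .., ?_⟩
      intro j hj hij
      rcases List.mem_cons.mp hj with rfl | hjt
      · omega
      · exact absurd (hpw'.1 j hjt) (by omega)
    · rw [List.find?_cons_of_neg hp] at hf
      obtain ⟨h1, h2, h3⟩ := ih hpw'.2 i hf
      refine ⟨h1, List.mem_cons_of_mem _ h2, ?_⟩
      intro j hj hij
      rcases List.mem_cons.mp hj with rfl | hjt
      · exact eq_false_of_ne_true hp ▸ rfl
      · exact h3 j hjt hij

theorem pvGetD_int (x : List Int) (i : Int) (h0 : 0 ≤ i) (h1 : i < (x.length : Int)) :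
    PySem.List.pyGetD x i 0 = x.getD i.toNat 0 := by
  rw [PySem.List.pyGetD_eq_getElem x 0 h0 h1]
  exact (List.getD_eq_getElem x 0 (by omega)).symm

def pvMono (x : List Int) : Prop :=
  ∀ p q : Nat, p ≤ q → q < x.length → x.getD p 0 ≤ x.getD q 0

-- above the last gap the values climb by at most 1, so every value below the max has its successor present
theorem pv_climb (x : List Int) (hmono : pvMono x) (i0 : Nat)
    (hg : ∀ j : Nat, i0 < j → j < x.length → x.getD j 0 ≤ x.getD (j - 1) 0 + 1) :
    ∀ (k j : Nat), i0 ≤ j → j < x.length → x.length - 1 - j ≤ k →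
      x.getD j 0 < x.getD (x.length - 1) 0 → x.getD j 0 + 1 ∈ x := by
  intro k
  induction k with
  | zero =>
    intro j _ hj hk hlt
    have : j = x.length - 1 := by omega
    subst this; omega
  | succ k ih =>
    intro j hij hj hk hlt
    have hjne : j ≠ x.length - 1 := by rintro rfl; omega
    have hj1 : j + 1 < x.length := by omega
    have hle : x.getD j 0 ≤ x.getD (j + 1) 0 := hmono j (j + 1) (by omega) hj1
    by_cases hcase : x.getD (j + 1) 0 = x.getD j 0
    · have := ih (j + 1) (by omega) hj1 (by omega) (by omega)
      rwa [hcase] at this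
    · have hstep := hg (j + 1) (by omega) hj1
      simp only [Nat.add_sub_cancel] at hstep
      have : x.getD (j + 1) 0 = x.getD j 0 + 1 := by omega
      rw [← this]
      rw [List.getD_eq_getElem x 0 hj1]
      exact List.getElem_mem _
    
theorem pvA_good (x : List Int) (hx : x ≠ []) (hmono : pvMono x) :
    pvGood x (x.getD (x.length - 1) 0) (pvAfold x) := by
  have hlen : 0 < x.length := List.length_pos_iff.mpr hx
  set mX := x.getD (x.length - 1) 0 with hmXdef
  have hmXmax : ∀ j : Nat, j < x.length → x.getD j 0 ≤ mX := by
    intro j hj; exact hmono j (x.length - 1) (by omega) (by omega)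
  -- rewrite A's fold into find? over the reversed range
  have hstep :
      pvAfold x =
      (PySem.List.pyRange 0 (x.length : Int) 1).foldl
        (fun v i =>
          if (decide (0 < i) &&
              decide (PySem.List.pyGetD x i 0 - PySem.List.pyGetD x (i - 1) 0 > 1)) then
            some (PySem.List.pyGetD x (i - 1) 0 + 1)
          else v)
        none := by
    unfold pvAfold
    simp only [PySem.List.len_eq]
    apply PySem.List.foldl_congr_mem
    intro v i _
    by_cases h1 : 0 < i <;>
      by_cases h2 : PySem.List.pyGetD x i 0 - PySem.List.pyGetD x (i - 1) 0 > 1 <;>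
      simp [h1, h2]
  rw [hstep, pv_foldl_overwrite]
  have hdesc : ((PySem.List.pyRange 0 (x.length : Int) 1).reverse).Pairwise (· > ·) := by
    rw [List.pairwise_reverse]
    exact PySem.List.pairwise_lt_pyRange_one 0 (x.length : Int)
  cases hf : ((PySem.List.pyRange 0 (x.length : Int) 1).reverse).find?
      (fun i => decide (0 < i) &&
        decide (PySem.List.pyGetD x i 0 - PySem.List.pyGetD x (i - 1) 0 > 1)) with
  | none =>
    show pvGood x mX none
    -- no gap at all: every value below the max has its successor in x
    have hnone := List.find?_eq_none.mp hf
    have hg : ∀ j : Nat, 0 < j → j < x.length → x.getD j 0 ≤ x.getD (j - 1) 0 + 1 := by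
      intro j h0 hj
      have hjr : (j : Int) ∈ (PySem.List.pyRange 0 (x.length : Int) 1).reverse := by
        rw [List.mem_reverse, PySem.List.mem_pyRange_one]
        constructor <;> [omega; exact_mod_cast hj]
      have := hnone _ hjr
      simp only [Bool.and_eq_true, decide_eq_true_eq, not_and] at this
      have h2 := this (by exact_mod_cast h0)
      rw [pvGetD_int x (j : Int) (by omega) (by exact_mod_cast hj),
          pvGetD_int x ((j : Int) - 1) (by omega) (by omega)] at h2
      have hc1 : ((j : Int)).toNat = j := by omega
      have hc2 : ((j : Int) - 1).toNat = j - 1 := by omega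
      rw [hc1, hc2] at h2
      omega
    intro e ⟨hex, hen, helt⟩
    obtain ⟨j, hj, hje⟩ := List.mem_iff_getElem.mp hex
    have hje' : x.getD j 0 = e := by rw [List.getD_eq_getElem x 0 hj]; exact hje
    exact hen (hje' ▸ pv_climb x hmono 0 hg x.length j (by omega) hj (by omega) (by omega))
  | some i =>
    obtain ⟨hp, hir, hlast⟩ := pv_find_desc _ _ hdesc i hf
    simp only [Bool.and_eq_true, decide_eq_true_eq] at hp
    obtain ⟨hi0, hgap⟩ := hp
    rw [List.mem_reverse, PySem.List.mem_pyRange_one] at hir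
    set n := i.toNat with hndef
    have hn1 : 1 ≤ n := by omega
    have hnl : n < x.length := by omega
    have hcast : (n : Int) = i := by omega
    have hgi : x.getD n 0 - x.getD (n - 1) 0 > 1 := by
      have h := hgap
      rw [pvGetD_int x i (by omega) (by omega),
          pvGetD_int x (i - 1) (by omega) (by omega)] at h
      have hc2 : (i - 1).toNat = n - 1 := by omega
      rw [← hndef, hc2] at h
      omega
    have hval : PySem.List.pyGetD x (i - 1) 0 = x.getD (n - 1) 0 := by
      rw [pvGetD_int x (i - 1) (by omega) (by omega)]
      rw [show (i - 1).toNat = n - 1 by omega]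
    show pvGood x mX (some (PySem.List.pyGetD x (i - 1) 0 + 1))
    rw [hval]
    set e := x.getD (n - 1) 0 with hedef
    have hgn : x.getD n 0 ≥ e + 2 := by omega
    refine ⟨e, rfl, ⟨?_, ?_, ?_⟩, ?_⟩
    · rw [hedef, List.getD_eq_getElem x 0 (show n - 1 < x.length by omega)]
      exact List.getElem_mem _
    · -- e+1 ∉ x
      intro hmem
      obtain ⟨j, hj, hje⟩ := List.mem_iff_getElem.mp hmem
      have hje' : x.getD j 0 = e + 1 := by rw [List.getD_eq_getElem x 0 hj]; exact hje
      by_cases hcase : j ≤ n - 1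
      · have := hmono j (n - 1) hcase (by omega); omega
      · have := hmono n j (by omega) hj; omega
    · -- e < mX
      have := hmXmax n hnl; omega
    · -- maximality: any e' with pvQ is ≤ e
      intro e' ⟨hex, hen, helt⟩
      by_contra hgt
      push Not at hgt
      obtain ⟨j, hj, hje⟩ := List.mem_iff_getElem.mp hex
      have hje' : x.getD j 0 = e' := by rw [List.getD_eq_getElem x 0 hj]; exact hje
      have hjn : n ≤ j := by
        by_contra hlt'
        push Not at hlt'
        have := hmono j (n - 1) (by omega) (by omega)
        omega
      have hg : ∀ jj : Nat, n < jj → jj < x.length → x.getD jj 0 ≤ x.getD (jj - 1) 0 + 1 := by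
        intro jj h0 hjj
        have hjr : (jj : Int) ∈ (PySem.List.pyRange 0 (x.length : Int) 1).reverse := by
          rw [List.mem_reverse, PySem.List.mem_pyRange_one]
          constructor <;> [omega; exact_mod_cast hjj]
        have := hlast _ hjr (by omega)
        simp only [Bool.and_eq_false_iff, decide_eq_false_iff_not, not_lt] at this
        rcases this with h' | h'
        · omega
        · rw [pvGetD_int x (jj : Int) (by omega) (by exact_mod_cast hjj),
              pvGetD_int x ((jj : Int) - 1) (by omega) (by omega)] at h'
          have hc1 : ((jj : Int)).toNat = jj := by omega
          have hc2 : ((jj : Int) - 1).toNat = jj - 1 := by omega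
          rw [hc1, hc2] at h'
          omega
      exact hen (hje' ▸ pv_climb x hmono n hg x.length j hjn hj (by omega) (by omega))

-- ===== VERDICT (by name: the statement is the Claim_ definition above) =====
theorem Solution_spec : Claim_equal_Solution := by
  intro a _ ha
  unfold Spec_Solution Solution Solution_alt
  set x := PySem.List.sorted a (fun y => y) false with hxdef
  have hx : x ≠ [] := by
    rw [hxdef, Ne, PySem.List.sorted_eq_nil_iff]; exact ha
  have hlen : 0 < x.length := List.length_pos_iff.mpr hx
  have hmemx : ∀ y, y ∈ x ↔ y ∈ a := fun y => PySem.List.mem_sorted a (fun y => y) false y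
  have hmono : pvMono x := by
    intro p q hpq hq
    rw [List.getD_eq_getElem x 0 (by omega), List.getD_eq_getElem x 0 hq]
    exact PySem.List.sorted_id_getElem_mono a hpq hq
  set s := PySem.Set.ofList a with hsdef
  have hmems : ∀ y, y ∈ s ↔ y ∈ a := fun y => PySem.Set.mem_ofList a y
  have hs : s ≠ [] := by
    cases a with
    | nil => exact absurd rfl ha
    | cons h t =>
      intro hnil
      have : h ∈ s := (hmems h).mpr (List.mem_cons_self ..)
      rw [hnil] at this
      exact absurd this (List.not_mem_nil)
  obtain ⟨m, hm⟩ : ∃ m, PySem.List.max? s (fun y => y) = some m := by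
    cases h : PySem.List.max? s (fun y => y) with
    | none => exact absurd ((PySem.List.max?_eq_none_iff s (fun y => y)).mp h) hs
    | some w => exact ⟨w, rfl⟩
  have hmmem : m ∈ s := PySem.List.max?_mem hm
  have hmmax : ∀ y ∈ s, y ≤ m := fun y hy => PySem.List.max?_isMax hm y hy
  set mX := x.getD (x.length - 1) 0 with hmXdef
  have hmXx : mX ∈ x := by
    rw [hmXdef, List.getD_eq_getElem x 0 (by omega)]
    exact List.getElem_mem _
  have hmX : mX = m := by
    apply le_antisymm
    · exact hmmax mX ((hmems mX).mpr ((hmemx mX).mp hmXx))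
    · obtain ⟨j, hj, hje⟩ := List.mem_iff_getElem.mp ((hmemx m).mpr ((hmems m).mp hmmem))
      have : x.getD j 0 ≤ mX := hmono j (x.length - 1) (by omega) (by omega)
      rw [List.getD_eq_getElem x 0 hj, hje] at this
      exact this
  have hA := pvA_good x hx hmono
  have hB := pvB_good s m hmmax
  have heq : pvAfold x = pvBfold s m :=
    pvGood_unique (fun y => (hmemx y).trans ((hmems y).symm)) hmX hA hB
  have hdflt : PySem.List.pyGetD x (PySem.List.len x - 1) 0 = mX := by
    rw [PySem.List.len_eq,
        PySem.List.pyGetD_eq_getElem x (i := (x.length : Int) - 1) 0 (by omega) (by omega),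
        hmXdef, List.getD_eq_getElem x 0 (by omega)]
    congr 1
    omega
  simp only [hm, heq, hdflt]
  cases pvBfold s m with
  | none => rw [hmX]
  | some w => rfl
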